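-- pv_equiv track=rewrite | github.com/tutgnss/GNSS_visualization_tools | data_processing.py | synchronisation
-- ===== SOURCE A (Python) =====
-- def synchronisation(list1, list2):
--     # Compare the time input of each list and synchronise them
--     # Input:
--     # list1 and list2 have this shape:
--     # [[time in HHMMSS.DD, LAT in DM, LONG in DM, ALT in m, N/S, E/W][...]]
--     # Return:
--     # 2 lists where list1[i][0] = list2[i][0]
--     new_list1 = []
--     new_list2 = []
--     for i in range(len(list1)):
--         for j in range(len(list2)):
--             if list1[i][0][0:6] == list2[j][0][0:6]:
--                 new_list1.append(list1[i])
--                 new_list2.append(list2[j])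
--     return new_list1, new_list2
-- ===== SOURCE B (Python) =====
-- def synchronisation(list1, list2):
--     # Group list2 rows by their 6-char time prefix, then one scan of list1.
--     index = {}
--     for row in list2:
--         index.setdefault(row[0][0:6], []).append(row)
--     new_list1 = []
--     new_list2 = []
--     for row in list1:
--         for match in index.get(row[0][0:6], []):
--             new_list1.append(row)
--             new_list2.append(match)
--     return new_list1, new_list2
-- ===== Notes on version B (the rewrite author's own statement) =====
-- stated objective: alternative
-- what changed: Replaces the nested scan with a dict that groups list2 rows by their 6-character time prefix once, then a single scan of list1 looks each prefix up, producing the same pairs in the same order; on match-heavy inputs both remain output-bound, so no speed is claimed.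
-- outside the precondition, e.g. on synchronisation([], [[]]): A returns ([], []), B raises IndexError; on synchronisation([[]], []): A returns ([], []), B raises IndexError
import Mathlib
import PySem

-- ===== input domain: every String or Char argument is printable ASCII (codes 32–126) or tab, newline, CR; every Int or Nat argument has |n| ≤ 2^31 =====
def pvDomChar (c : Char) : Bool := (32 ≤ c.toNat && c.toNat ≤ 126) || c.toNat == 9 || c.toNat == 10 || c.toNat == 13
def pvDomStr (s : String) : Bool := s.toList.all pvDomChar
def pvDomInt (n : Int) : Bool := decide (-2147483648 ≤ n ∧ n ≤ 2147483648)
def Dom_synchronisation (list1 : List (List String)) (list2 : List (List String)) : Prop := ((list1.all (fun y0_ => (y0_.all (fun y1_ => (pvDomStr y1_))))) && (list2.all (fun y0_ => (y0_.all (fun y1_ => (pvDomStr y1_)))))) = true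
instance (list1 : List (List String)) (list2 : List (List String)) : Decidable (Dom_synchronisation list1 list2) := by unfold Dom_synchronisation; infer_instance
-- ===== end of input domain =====

-- B groups list2 rows by their 6-char time prefix in a dict once and then scans list1 once,
-- instead of A's nested scan; same output, same order.

-- row[0][0:6], the 6-character time prefix of a row (default only reached outside Pre_).
def pvKey (row : List String) : String :=
  PySem.Str.slice (PySem.List.pyGetD row 0 "") (some 0) (some 6)

-- ===== PORT A =====
def synchronisation (list1 : List (List String)) (list2 : List (List String)) : List (List String) × List (List String) :=
  (PySem.List.pyRange 0 list1.length 1).foldl (fun acc i =>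
    (PySem.List.pyRange 0 list2.length 1).foldl (fun acc j =>
      if pvKey (PySem.List.pyGetD list1 i []) == pvKey (PySem.List.pyGetD list2 j []) then
        (acc.1 ++ [PySem.List.pyGetD list1 i []], acc.2 ++ [PySem.List.pyGetD list2 j []])
      else acc) acc)
    (([], []) : List (List String) × List (List String))

-- ===== PORT B =====
def synchronisation_alt (list1 : List (List String)) (list2 : List (List String)) : List (List String) × List (List String) :=
  let index : PySem.Dict String (List (List String)) :=
    list2.foldl (fun d row => d.modify (pvKey row) [] (· ++ [row])) PySem.Dict.empty
  list1.foldl (fun acc row =>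
    (index.getD (pvKey row) []).foldl (fun acc m => (acc.1 ++ [row], acc.2 ++ [m])) acc)
    (([], []) : List (List String) × List (List String))

-- ===== PRECONDITION & SPEC =====
-- Pre_ excludes inputs containing an empty row: A raises IndexError on them, except when the other
-- list is empty so the row is never indexed (A then returns ([], [])), while B's grouping/lookup
-- passes touch every row and raise there.
def Pre_synchronisation (list1 : List (List String)) (list2 : List (List String)) : Prop :=
  (∀ r ∈ list1, r ≠ []) ∧ (∀ r ∈ list2, r ≠ [])
instance (list1 : List (List String)) (list2 : List (List String)) : Decidable (Pre_synchronisation list1 list2) := by unfold Pre_synchronisation; infer_instance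

def pvWitness_synchronisation : List (List String) × List (List String) :=
  ([["123456.78", "111", "222"]], [["123456.99", "333", "444"]])

def Spec_synchronisation (list1 : List (List String)) (list2 : List (List String)) (out : List (List String) × List (List String)) : Prop := out = synchronisation_alt list1 list2
instance (list1 : List (List String)) (list2 : List (List String)) (out : List (List String) × List (List String)) : Decidable (Spec_synchronisation list1 list2 out) := by unfold Spec_synchronisation; infer_instance

-- ===== CLAIM (what is proved, stated in full; the proofs are below) =====
def Claim_equal_synchronisation : Prop := ∀ (list1 : List (List String)) (list2 : List (List String)), Dom_synchronisation list1 list2 → Pre_synchronisation list1 list2 → Spec_synchronisation list1 list2 (synchronisation list1 list2)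

-- ===== LEMMAS AND PROOFS =====

-- B's dict maps each prefix c to exactly the list2 rows whose prefix is c, in order.
lemma index_getD (list2 : List (List String)) (c : String) :
    (list2.foldl (fun d row => d.modify (pvKey row) [] (· ++ [row]))
      (PySem.Dict.empty : PySem.Dict String (List (List String)))).getD c []
      = list2.filter (fun r => pvKey r == c) := by
  have h : list2.foldl (fun d row => d.modify (pvKey row) [] (· ++ [row]))
      (PySem.Dict.empty : PySem.Dict String (List (List String)))
      = (list2.map (fun r => (pvKey r, r))).foldl (fun d p => d.modify p.1 [] (· ++ [p.2]))
          PySem.Dict.empty := by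
    rw [List.foldl_map]
  rw [h, PySem.Dict.getD_foldl_modify_append]
  rw [List.filter_map]
  simp [Function.comp_def]

-- A's inner index loop, rewritten over elements, equals B's loop over the dict bucket.
lemma inner_eq (list2 : List (List String)) (row1 : List String)
    (acc : List (List String) × List (List String)) :
    list2.foldl (fun acc r2 =>
        if pvKey row1 == pvKey r2 then (acc.1 ++ [row1], acc.2 ++ [r2]) else acc) acc
      = (list2.filter (fun r => pvKey r == pvKey row1)).foldl
          (fun acc m => (acc.1 ++ [row1], acc.2 ++ [m])) acc := by
  have hf : list2.filter (fun r => pvKey r == pvKey row1)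
      = list2.filter (fun r2 => pvKey row1 == pvKey r2) :=
    List.filter_congr (fun r2 _ => Bool.beq_comm)
  rw [hf]
  exact PySem.List.foldl_if_eq_foldl_filter (fun r2 => pvKey row1 == pvKey r2)
    (fun acc r2 => (acc.1 ++ [row1], acc.2 ++ [r2])) list2 acc

theorem synchronisation_spec : Claim_equal_synchronisation := by
  intro list1 list2 _ _
  unfold Spec_synchronisation synchronisation synchronisation_alt
  rw [PySem.List.foldl_pyRange_zero_pyGetD' list1 ([] : List String)
        (fun acc row1 => (PySem.List.pyRange 0 (list2.length : Int) 1).foldl (fun acc j =>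
          if pvKey row1 == pvKey (PySem.List.pyGetD list2 j []) then
            (acc.1 ++ [row1], acc.2 ++ [PySem.List.pyGetD list2 j []]) else acc) acc)
        (([], []) : List (List String) × List (List String))]
  apply PySem.List.foldl_congr_mem
  intro acc row1 _
  rw [PySem.List.foldl_pyRange_zero_pyGetD' list2 ([] : List String)
        (fun acc r2 => if pvKey row1 == pvKey r2 then (acc.1 ++ [row1], acc.2 ++ [r2]) else acc) acc]
  rw [index_getD, inner_eq]
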